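-- pv_equiv track=rewrite | github.com/ChristopherHowe/UNR | Fall-2023/477-Analysis-of-Algorithms/HW7/salon.py | getLowestCompletionTime
-- ===== SOURCE A (Python) =====
-- def getLowestCompletionTime(customers):
--     sorted_customers = sorted(customers, key=lambda x: x['s'], reverse=True)
--     nextStartTime = 0
--     completionTime = 0
--     for customer in sorted_customers:
--         serviceTime = customer['w'] + customer['s']
--         jobDone = nextStartTime + serviceTime
--         if jobDone >= completionTime:
--             completionTime = jobDone
--         nextStartTime += customer['w']
--     return completionTime
-- ===== SOURCE B (Python) =====
-- def getLowestCompletionTime(customers):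
--     # Back-to-front: walk the schedule from the last job to the first, maintaining
--     # only the max completion time RELATIVE to the current suffix's local start;
--     # each earlier customer shifts that max by its wash time. No prefix sums and
--     # no running start-time accumulator.
--     ordered = sorted(customers, key=lambda c: c['s'], reverse=True)
--     best = None  # max completion of the suffix seen so far, measured from its own start
--     for c in reversed(ordered):
--         here = c['w'] + c['s']
--         best = here if best is None else max(here, c['w'] + best)
--     return 0 if best is None else max(best, 0)
-- ===== Notes on version B (the rewrite author's own statement) =====
-- stated objective: alternative
-- what changed: A scans forward keeping a running start time (prefix sum of wash times) and a running max; B instead traverses the sorted schedule backwards keeping a single value, the max completion time relative to the suffix's local start, shifting it by each earlier customer's wash time, so no prefix sums or start-time accumulator exist.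
import Mathlib
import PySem

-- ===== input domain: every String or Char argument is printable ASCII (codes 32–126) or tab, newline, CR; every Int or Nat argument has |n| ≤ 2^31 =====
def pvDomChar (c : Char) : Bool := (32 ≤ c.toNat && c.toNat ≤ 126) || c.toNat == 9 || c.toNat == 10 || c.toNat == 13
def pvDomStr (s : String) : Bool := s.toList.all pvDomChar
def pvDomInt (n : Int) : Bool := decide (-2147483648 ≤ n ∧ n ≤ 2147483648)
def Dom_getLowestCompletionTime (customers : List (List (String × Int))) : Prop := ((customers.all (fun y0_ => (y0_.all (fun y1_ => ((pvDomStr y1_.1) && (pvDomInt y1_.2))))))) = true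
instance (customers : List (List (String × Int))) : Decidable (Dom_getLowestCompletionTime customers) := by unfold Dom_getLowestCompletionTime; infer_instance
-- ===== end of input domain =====

-- A vs B: A scans forward with a running start time (prefix sum) plus a running max; B walks the sorted schedule backwards keeping only the max completion relative to the suffix's local start, shifting it by each earlier wash time. Equivalent on inputs where every customer has both keys.

-- ===== PORT A =====
-- customer['k'] is ported as Dict.getD … 0; Pre_ below excludes the KeyError inputs, so this is exact on the admitted domain.
def getLowestCompletionTime (customers : List (List (String × Int))) : Int :=
  let sorted_customers := PySem.List.sorted customers (fun x => PySem.Dict.getD (PySem.Dict.mk x) "s" 0) true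
  (sorted_customers.foldl (fun (acc : Int × Int) customer =>
      let serviceTime := PySem.Dict.getD (PySem.Dict.mk customer) "w" 0 + PySem.Dict.getD (PySem.Dict.mk customer) "s" 0
      let jobDone := acc.1 + serviceTime
      let completionTime := if jobDone ≥ acc.2 then jobDone else acc.2
      (acc.1 + PySem.Dict.getD (PySem.Dict.mk customer) "w" 0, completionTime)) (0, 0)).2

-- ===== PORT B =====
-- the loop body of Source B: update the suffix-relative best with one customer
def bStep (acc : Option Int) (c : List (String × Int)) : Option Int :=
  let here := PySem.Dict.getD (PySem.Dict.mk c) "w" 0 + PySem.Dict.getD (PySem.Dict.mk c) "s" 0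
  match acc with
  | none => some here
  | some b => some (max here (PySem.Dict.getD (PySem.Dict.mk c) "w" 0 + b))

def getLowestCompletionTime_alt (customers : List (List (String × Int))) : Int :=
  let ordered := PySem.List.sorted customers (fun c => PySem.Dict.getD (PySem.Dict.mk c) "s" 0) true
  let best := ordered.reverse.foldl bStep none    -- 'for c in reversed(ordered)'
  match best with
  | none => 0
  | some b => max b 0

-- ===== PRECONDITION & SPEC =====
-- Pre_ excludes inputs where some customer lacks key 's' or 'w': A raises KeyError there.
def Pre_getLowestCompletionTime (customers : List (List (String × Int))) : Prop :=
  customers.all (fun c => (PySem.Dict.get? (PySem.Dict.mk c) "s").isSome && (PySem.Dict.get? (PySem.Dict.mk c) "w").isSome) = true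
instance (customers : List (List (String × Int))) : Decidable (Pre_getLowestCompletionTime customers) := by unfold Pre_getLowestCompletionTime; infer_instance
def pvWitness_getLowestCompletionTime : (List (List (String × Int))) := [[("s", 2), ("w", 3)], [("s", 1), ("w", 4)]]

def Spec_getLowestCompletionTime (customers : List (List (String × Int))) (out : Int) : Prop := out = getLowestCompletionTime_alt customers
instance (customers : List (List (String × Int))) (out : Int) : Decidable (Spec_getLowestCompletionTime customers out) := by unfold Spec_getLowestCompletionTime; infer_instance

-- ===== CLAIM (what is proved, stated in full; the proofs are below) =====
def Claim_equal_getLowestCompletionTime : Prop := ∀ (customers : List (List (String × Int))), Dom_getLowestCompletionTime customers → Pre_getLowestCompletionTime customers → Spec_getLowestCompletionTime customers (getLowestCompletionTime customers)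

-- ===== LEMMAS AND PROOFS =====

-- A's completion list: inclusive prefix sums of w plus s, starting from t
def comps (t : Int) : List (List (String × Int)) → List Int
  | [] => []
  | c :: cs =>
      (t + PySem.Dict.getD (PySem.Dict.mk c) "w" 0 + PySem.Dict.getD (PySem.Dict.mk c) "s" 0)
        :: comps (t + PySem.Dict.getD (PySem.Dict.mk c) "w" 0) cs

-- A's loop equals a running max over its completion list
theorem loopA_eq_foldl_max (L : List (List (String × Int))) (ns ct : Int) :
    (L.foldl (fun (acc : Int × Int) customer =>
      let serviceTime := PySem.Dict.getD (PySem.Dict.mk customer) "w" 0 + PySem.Dict.getD (PySem.Dict.mk customer) "s" 0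
      let jobDone := acc.1 + serviceTime
      let completionTime := if jobDone ≥ acc.2 then jobDone else acc.2
      (acc.1 + PySem.Dict.getD (PySem.Dict.mk customer) "w" 0, completionTime)) (ns, ct)).2
    = (comps ns L).foldl max ct := by
  induction L generalizing ns ct with
  | nil => simp [comps]
  | cons c cs ih =>
      simp only [comps, List.foldl_cons]
      rw [ih]
      congr 1
      rw [max_def]
      have : ns + (PySem.Dict.getD (PySem.Dict.mk c) "w" 0 + PySem.Dict.getD (PySem.Dict.mk c) "s" 0)
           = ns + PySem.Dict.getD (PySem.Dict.mk c) "w" 0 + PySem.Dict.getD (PySem.Dict.mk c) "s" 0 := by ring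
      simp only [ge_iff_le, this]

-- B's right-to-left fold computes the max of the completion list, up to the shift t
theorem foldr_bStep_comps (L : List (List (String × Int))) (t ct : Int) :
    (comps t L).foldl max ct
      = (match L.foldr (fun c acc => bStep acc c) none with
         | none => ct
         | some b => max (t + b) ct) := by
  induction L generalizing t ct with
  | nil => rfl
  | cons c cs ih =>
      simp only [comps, List.foldl_cons, List.foldr_cons]
      rw [ih]
      cases h : cs.foldr (fun c acc => bStep acc c) none with
      | none => simp only [bStep]; rw [max_comm]; ring_nf
      | some b =>
          simp only [bStep]
          have : t + max (PySem.Dict.getD (PySem.Dict.mk c) "w" 0 + PySem.Dict.getD (PySem.Dict.mk c) "s" 0)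
                        (PySem.Dict.getD (PySem.Dict.mk c) "w" 0 + b)
               = max (t + PySem.Dict.getD (PySem.Dict.mk c) "w" 0 + PySem.Dict.getD (PySem.Dict.mk c) "s" 0)
                     (t + PySem.Dict.getD (PySem.Dict.mk c) "w" 0 + b) := by
            rw [← max_add_add_left]; ring_nf
          rw [this]
          simp [max_comm, max_left_comm, add_assoc]

-- ===== VERDICT (by name: the statement is the Claim_ definition above) =====
theorem getLowestCompletionTime_spec : Claim_equal_getLowestCompletionTime := by
  intro customers _ _
  unfold Spec_getLowestCompletionTime getLowestCompletionTime getLowestCompletionTime_alt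
  simp only []
  rw [loopA_eq_foldl_max, List.foldl_reverse]
  rw [foldr_bStep_comps]
  cases h : (PySem.List.sorted customers (fun c => PySem.Dict.getD (PySem.Dict.mk c) "s" 0) true).foldr (fun c acc => bStep acc c) none with
  | none => rfl
  | some b => simp
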